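-- pv_equiv track=rewrite | github.com/MuteJester/AlignAIR | src/AlignAIR/Pipeline/AIRR/alignment.py | build_sequence_alignment
-- ===== SOURCE A (Python) =====
-- from typing import Dict, Optional, Tuple
--
-- def _count_gaps(ref: str) -> int:
--     """Count IMGT gap characters ('.') in a reference sequence."""
--     return ref.count('.')
--
-- def build_sequence_alignment(
--     seq: str,
--     v_ref_gapped: str,
--     v_seq_start: int,
--     v_seq_end: int,
--     v_germ_start: int,
--     v_germ_end: int,
--     j_seq_end: int,
-- ) -> Optional[str]:
--     """Build the IMGT-gapped sequence alignment string.
--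
--     Inserts IMGT gap characters ('.') into the sequence to match the
--     V-germline gapped reference, then appends the D+J portion as-is.
--     """
--     if not v_ref_gapped:
--         return None
--
--     gaps = _count_gaps(v_ref_gapped)
--     v_ref_trimmed = v_ref_gapped[:v_germ_end + gaps]
--
--     # The portion of the query that aligns to V
--     seq_to_gap = seq[v_seq_start:v_seq_end]
--
--     # The remainder (D + J region, unaligned)
--     seq_remain = seq[v_seq_end:j_seq_end]
--
--     # Pad front if V germline doesn't start at position 0
--     if v_germ_start > 0:
--         seq_to_gap = '.' * v_germ_start + seq_to_gap
--
--     # Walk through the V reference and insert gaps where the reference has them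
--     seq_iter = iter(seq_to_gap)
--     aligned = []
--     started = False
--     for ref_base in v_ref_trimmed:
--         if ref_base != '.':
--             started = True
--             aligned.append(next(seq_iter, '.'))
--         else:
--             aligned.append('.' if started else next(seq_iter, '.'))
--
--     return ''.join(aligned) + seq_remain
-- ===== SOURCE B (Python) =====
-- def build_sequence_alignment(seq, v_ref_gapped, v_seq_start, v_seq_end, v_germ_start, v_germ_end, j_seq_end):
--     if not v_ref_gapped:
--         return None
--     ref = v_ref_gapped[:v_germ_end + v_ref_gapped.count('.')]
--     s = seq[v_seq_start:v_seq_end]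
--     if v_germ_start > 0:
--         s = '.' * v_germ_start + s
--     # index of the first non-gap slot (len(ref) if the reference is all gaps)
--     k = next((i for i, c in enumerate(ref) if c != '.'), len(ref))
--     # positions of the internal gaps ('.' at or after the first non-gap slot)
--     gap_pos = [i for i in range(k, len(ref)) if ref[i] == '.']
--     # ungapped base: the sequence chars, '.'-padded and truncated to the number of non-gap slots
--     out = list((s + '.' * len(ref))[:len(ref) - len(gap_pos)])
--     # re-insert one '.' at each internal gap position (ascending, final coordinates)
--     for p in gap_pos:
--         out.insert(p, '.')
--     return ''.join(out) + seq[v_seq_end:j_seq_end]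
-- ===== Notes on version B (the rewrite author's own statement) =====
-- stated objective: alternative
-- what changed: A interleaves sequence chars and gaps in one stateful pass (an iterator over the sequence plus a 'started' flag deciding per reference slot); B instead computes the list of internal gap positions of the reference, builds the ungapped base string by '.'-padding/truncating the sequence to the number of consuming slots, and re-inserts one '.' at each recorded position.
import Mathlib
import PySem

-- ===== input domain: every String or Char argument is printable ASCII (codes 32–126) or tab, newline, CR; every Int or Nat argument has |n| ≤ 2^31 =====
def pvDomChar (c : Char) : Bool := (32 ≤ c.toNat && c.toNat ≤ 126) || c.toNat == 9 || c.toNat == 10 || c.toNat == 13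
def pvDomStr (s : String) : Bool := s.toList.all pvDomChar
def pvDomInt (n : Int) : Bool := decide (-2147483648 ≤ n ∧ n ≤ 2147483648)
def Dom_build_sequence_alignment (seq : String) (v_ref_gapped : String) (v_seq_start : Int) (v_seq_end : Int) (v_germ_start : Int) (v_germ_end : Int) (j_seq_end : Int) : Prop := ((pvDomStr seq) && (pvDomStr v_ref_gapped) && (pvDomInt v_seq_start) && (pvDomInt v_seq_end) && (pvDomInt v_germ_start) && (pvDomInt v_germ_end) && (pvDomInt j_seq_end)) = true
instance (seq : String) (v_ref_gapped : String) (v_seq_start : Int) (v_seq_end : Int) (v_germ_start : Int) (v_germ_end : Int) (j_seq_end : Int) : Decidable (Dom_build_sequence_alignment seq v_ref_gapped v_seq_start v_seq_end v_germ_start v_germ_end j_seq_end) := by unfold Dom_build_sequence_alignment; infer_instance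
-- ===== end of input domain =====

-- B replaces A's stateful char-by-char interleave (iterator over the sequence + a 'started'
-- flag, one output char per reference slot) by a delete/re-insert algorithm: it computes the
-- list of internal gap POSITIONS of the reference, builds the ungapped base string by padding/
-- truncation, and re-inserts one '.' at each recorded position (objective: alternative).

-- ===== PORT A =====
-- A's loop over the trimmed reference: iterator over seq chars + 'started' flag
def pvLoopA : List Char → List Char → Bool → List Char
  | [], _, _ => []
  | r :: rs, s, started =>
    if r ≠ '.' then
      match s with
      | c :: cs => c :: pvLoopA rs cs true
      | [] => '.' :: pvLoopA rs [] true
    else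
      if started then '.' :: pvLoopA rs s started
      else
        match s with
        | c :: cs => c :: pvLoopA rs cs started
        | [] => '.' :: pvLoopA rs [] started

def build_sequence_alignment (seq : String) (v_ref_gapped : String) (v_seq_start : Int) (v_seq_end : Int) (v_germ_start : Int) (v_germ_end : Int) (j_seq_end : Int) : Option String :=
  let v := v_ref_gapped.toList
  if v = [] then none
  else
    let gaps : Int := PySem.Chars.count v ['.']
    let v_ref_trimmed := PySem.List.slice v none (some (v_germ_end + gaps))
    let seq_to_gap := PySem.List.slice seq.toList (some v_seq_start) (some v_seq_end)
    let seq_remain := PySem.List.slice seq.toList (some v_seq_end) (some j_seq_end)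
    let seq_to_gap := if v_germ_start > 0 then List.replicate v_germ_start.toNat '.' ++ seq_to_gap else seq_to_gap
    some (String.ofList (pvLoopA v_ref_trimmed seq_to_gap false ++ seq_remain))

-- ===== PORT B =====
def build_sequence_alignment_alt (seq : String) (v_ref_gapped : String) (v_seq_start : Int) (v_seq_end : Int) (v_germ_start : Int) (v_germ_end : Int) (j_seq_end : Int) : Option String :=
  let v := v_ref_gapped.toList
  if v = [] then none
  else
    let ref := PySem.List.slice v none (some (v_germ_end + (PySem.Chars.count v ['.'] : Int)))
    let s0 := PySem.List.slice seq.toList (some v_seq_start) (some v_seq_end)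
    let s := if v_germ_start > 0 then List.replicate v_germ_start.toNat '.' ++ s0 else s0
    -- next((i for i, c in enumerate(ref) if c != '.'), len(ref)): first non-'.' index
    let k := (ref.takeWhile (fun c => c = '.')).length
    -- [i for i in range(k, len(ref)) if ref[i] == '.']; every i is in [0, len ref), so getD is exact for ref[i]
    let gap_pos := (List.range' k (ref.length - k)).filter (fun i => ref.getD i ' ' == '.')
    -- list((s + '.' * len(ref))[:len(ref) - len(gap_pos)])
    let base := (s ++ List.replicate ref.length '.').take (ref.length - gap_pos.length)
    -- for p in gap_pos: out.insert(p, '.')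
    let out := gap_pos.foldl (fun acc (p : Nat) => PySem.List.insert acc (p : Int) '.') base
    some (String.ofList (out ++ PySem.List.slice seq.toList (some v_seq_end) (some j_seq_end)))

-- ===== PRECONDITION & SPEC =====
def Spec_build_sequence_alignment (seq : String) (v_ref_gapped : String) (v_seq_start : Int) (v_seq_end : Int) (v_germ_start : Int) (v_germ_end : Int) (j_seq_end : Int) (out : Option String) : Prop := out = build_sequence_alignment_alt seq v_ref_gapped v_seq_start v_seq_end v_germ_start v_germ_end j_seq_end
instance (seq : String) (v_ref_gapped : String) (v_seq_start : Int) (v_seq_end : Int) (v_germ_start : Int) (v_germ_end : Int) (j_seq_end : Int) (out : Option String) : Decidable (Spec_build_sequence_alignment seq v_ref_gapped v_seq_start v_seq_end v_germ_start v_germ_end j_seq_end out) := by unfold Spec_build_sequence_alignment; infer_instance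

-- ===== CLAIM (what is proved, stated in full; the proofs are below) =====
def Claim_equal_build_sequence_alignment : Prop := ∀ (seq : String) (v_ref_gapped : String) (v_seq_start : Int) (v_seq_end : Int) (v_germ_start : Int) (v_germ_end : Int) (j_seq_end : Int), Dom_build_sequence_alignment seq v_ref_gapped v_seq_start v_seq_end v_germ_start v_germ_end j_seq_end → Spec_build_sequence_alignment seq v_ref_gapped v_seq_start v_seq_end v_germ_start v_germ_end j_seq_end (build_sequence_alignment seq v_ref_gapped v_seq_start v_seq_end v_germ_start v_germ_end j_seq_end)

-- ===== LEMMAS AND PROOFS =====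

def pvFillGaps : List Char → List Char → List Char
  | [], _ => []
  | c :: rs, s => if c = '.' then '.' :: pvFillGaps rs s else s.headD '.' :: pvFillGaps rs s.tail

def pvM (t : List Char) : Nat := t.countP (fun c => !(c == '.'))

def pvGapIdx : List Char → List Nat
  | [] => []
  | c :: rs => if c = '.' then 0 :: (pvGapIdx rs).map (fun p => 1 + p) else (pvGapIdx rs).map (fun p => 1 + p)

def pvInsF (acc : List Char) (p : Nat) : List Char := PySem.List.insert acc (p : Int) '.'

-- once 'started' is set, A's loop is exactly the flag-free gap fill
theorem pvLoopA_true_eq_fillGaps (rs : List Char) : ∀ s, pvLoopA rs s true = pvFillGaps rs s := by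
  induction rs with
  | nil => intro s; rfl
  | cons r rs ih =>
    intro s
    by_cases hr : r = '.'
    · subst hr; simp [pvLoopA, pvFillGaps, ih]
    · cases s with
      | nil => simp [pvLoopA, pvFillGaps, hr, ih]
      | cons c cs => simp [pvLoopA, pvFillGaps, hr, ih]

-- A's loop with started = false splits at the first non-gap slot of the reference
theorem pvLoopA_false_split (ref : List Char) : ∀ s,
    pvLoopA ref s false =
      (s.take ((ref.takeWhile (fun c => c = '.')).length)
        ++ List.replicate ((ref.takeWhile (fun c => c = '.')).length - s.length) '.')
      ++ pvFillGaps (ref.drop ((ref.takeWhile (fun c => c = '.')).length))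
          (s.drop ((ref.takeWhile (fun c => c = '.')).length)) := by
  induction ref with
  | nil => intro s; simp [pvLoopA, pvFillGaps]
  | cons r rs ih =>
    intro s
    by_cases hr : r = '.'
    · subst hr
      cases s with
      | nil => simp [pvLoopA, List.takeWhile, ih, List.replicate_succ]
      | cons c cs => simp [pvLoopA, List.takeWhile, ih]
    · have ht : (r :: rs).takeWhile (fun c => c = '.') = [] := by
        simp [List.takeWhile, hr]
      rw [ht]
      cases s with
      | nil => simp [pvLoopA, pvFillGaps, hr, pvLoopA_true_eq_fillGaps]
      | cons c cs => simp [pvLoopA, pvFillGaps, hr, pvLoopA_true_eq_fillGaps]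


theorem pv_insert_take_drop (l : List Char) (p : Nat) (a : Char) :
    PySem.List.insert l (p : Int) a = l.take p ++ a :: l.drop p := by
  by_cases hp : p ≤ l.length
  · exact PySem.List.insert_natCast l p a hp
  · simp only [PySem.List.insert, PySem.List.sliceIndices]
    rw [if_neg (by omega)]
    norm_num
    rw [show (min (p:Int) l.length).toNat = l.length by omega]
    simp [List.take_of_length_le (by omega : l.length ≤ p), List.drop_eq_nil_of_le (by omega : l.length ≤ p)]

theorem pv_insert_shift (h b : List Char) (p : Nat) (a : Char) :
    PySem.List.insert (h ++ b) ((h.length + p : Nat) : Int) a = h ++ PySem.List.insert b (p : Int) a := by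
  rw [pv_insert_take_drop, pv_insert_take_drop]
  simp [List.take_append, List.drop_append, List.take_of_length_le (by omega : h.length ≤ h.length + p),
        List.drop_eq_nil_of_le (by omega : h.length ≤ h.length + p)]

theorem pv_foldl_insert_shift (ps : List Nat) : ∀ (k : Nat) (h b : List Char), h.length = k →
    ((ps.map (fun p => k + p)).foldl pvInsF (h ++ b)) = h ++ ps.foldl pvInsF b := by
  induction ps with
  | nil => intro k h b hk; simp
  | cons p ps ih =>
    intro k h b hk
    simp only [List.map_cons, List.foldl_cons]
    rw [show pvInsF (h ++ b) (k + p) = h ++ pvInsF b p by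
      simp only [pvInsF]; rw [← hk]; exact pv_insert_shift h b p '.']
    exact ih k h _ hk

theorem pv_insertAll_eq_fillGaps (t : List Char) : ∀ b : List Char, b.length = pvM t →
    (pvGapIdx t).foldl pvInsF b = pvFillGaps t b := by
  induction t with
  | nil =>
    intro b hb
    have : b = [] := List.eq_nil_of_length_eq_zero (by simpa [pvM] using hb)
    simp [this, pvGapIdx, pvFillGaps]
  | cons c ts ih =>
    intro b hb
    by_cases hc : c = '.'
    · subst hc
      have hb' : b.length = pvM ts := by simpa [pvM] using hb
      rw [show pvGapIdx ('.' :: ts) = 0 :: (pvGapIdx ts).map (fun p => 1 + p) by simp [pvGapIdx]]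
      rw [List.foldl_cons]
      rw [show pvInsF b 0 = ['.'] ++ b by simp [pvInsF, PySem.List.insert_zero]]
      rw [pv_foldl_insert_shift (pvGapIdx ts) 1 ['.'] b rfl, ih b hb']
      simp [pvFillGaps]
    · have hb' : b.length = pvM ts + 1 := by simpa [pvM, hc] using hb
      cases b with
      | nil => simp at hb'
      | cons x b' =>
        rw [show pvGapIdx (c :: ts) = (pvGapIdx ts).map (fun p => 1 + p) by simp [pvGapIdx, hc]]
        rw [show (x :: b' : List Char) = [x] ++ b' by rfl]
        rw [pv_foldl_insert_shift (pvGapIdx ts) 1 [x] b' rfl, ih b' (by simpa using hb')]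
        simp [pvFillGaps, hc]

theorem pv_gap_pos_eq (t : List Char) : ∀ pre : List Char,
    (List.range' pre.length t.length).filter (fun i => (pre ++ t).getD i ' ' == '.')
      = (pvGapIdx t).map (fun q => pre.length + q) := by
  induction t with
  | nil => intro pre; simp [pvGapIdx]
  | cons c ts ih =>
    intro pre
    have hhead : (pre ++ c :: ts).getD pre.length ' ' = c := by
      simp [List.getD_eq_getElem?_getD]
    have htailpred : (List.range' (pre.length + 1) ts.length).filter (fun i => (pre ++ c :: ts).getD i ' ' == '.')
        = (pvGapIdx ts).map (fun q => pre.length + (1 + q)) := by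
      rw [List.append_cons]
      have := ih (pre ++ [c])
      simp only [List.length_append, List.length_cons, List.length_nil] at this ⊢
      rw [show pre.length + 1 = pre.length + (0 + 1) by omega] at this
      simpa [Nat.add_assoc, Nat.add_comm, Nat.add_left_comm] using this
    rw [show (c :: ts).length = ts.length + 1 by simp, List.range'_succ, List.filter_cons]
    by_cases hc : c = '.'
    · have hcond : ((pre ++ c :: ts).getD pre.length ' ' == '.') = true := by simp [hc]
      simp only [hcond, if_true]
      rw [htailpred]
      simp [pvGapIdx, hc, List.map_map]
      exact fun a _ => by omega
    · have hcond : ((pre ++ c :: ts).getD pre.length ' ' == '.') = false := by rw [hhead]; simp [hc]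
      simp only [hcond, Bool.false_eq_true, if_false]
      rw [htailpred]
      simp [pvGapIdx, hc, List.map_map]
      exact fun a _ => by omega

theorem pv_getD_tail (l : List Char) (i : Nat) (d : Char) : (l.tail).getD i d = l.getD (i+1) d := by
  simp [List.getD_eq_getElem?_getD, ← List.drop_one, List.getElem?_drop, Nat.add_comm]

theorem pv_fillGaps_congr (t : List Char) : ∀ u w : List Char,
    (∀ i, i < pvM t → u.getD i '.' = w.getD i '.') → pvFillGaps t u = pvFillGaps t w := by
  induction t with
  | nil => intro u w _; rfl
  | cons c ts ih =>
    intro u w h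
    by_cases hc : c = '.'
    · simp only [pvFillGaps, if_pos hc]
      exact congrArg _ (ih u w (by intro i hi; exact h i (by simpa [pvM, hc] using hi)))
    · have hm : pvM (c :: ts) = pvM ts + 1 := by simp [pvM, hc]
      simp only [pvFillGaps, if_neg hc]
      have hh : u.headD '.' = w.headD '.' := by
        have h0 := h 0 (by omega)
        cases u <;> cases w <;> first | rfl | simpa using h0
      rw [hh]
      exact congrArg _ (ih u.tail w.tail (by
        intro i hi
        rw [pv_getD_tail, pv_getD_tail]
        exact h (i+1) (by omega)))

theorem pv_length_gapIdx (t : List Char) : (pvGapIdx t).length = t.countP (fun c => c == '.') := by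
  induction t with
  | nil => rfl
  | cons c ts ih => by_cases hc : c = '.' <;> simp [pvGapIdx, hc, ih]

theorem pv_countP_split (t : List Char) : t.countP (fun c => c == '.') + pvM t = t.length := by
  induction t with
  | nil => rfl
  | cons c ts ih => by_cases hc : c = '.' <;> simp [pvM, hc] <;> simp [pvM] at ih <;> omega

theorem pv_getD_take (l : List Char) (i n : Nat) (d : Char) (h : i < n) : (l.take n).getD i d = l.getD i d := by
  simp [List.getD_eq_getElem?_getD, h]

theorem pv_getD_drop (l : List Char) (k i : Nat) (d : Char) : (l.drop k).getD i d = l.getD (k+i) d := by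
  simp [List.getD_eq_getElem?_getD, List.getElem?_drop]

theorem pv_getD_append_replicate_dot (s : List Char) (n L : Nat) :
    (s ++ List.replicate L ('.':Char)).getD n '.' = s.getD n '.' := by
  rcases lt_or_ge n s.length with h | h
  · simp [List.getD_eq_getElem?_getD, List.getElem?_append_left h]
  · simp only [List.getD_eq_getElem?_getD, List.getElem?_append_right h, List.getElem?_replicate,
      List.getElem?_eq_none (by simpa using h)]
    split <;> simp


theorem pv_main (ref s : List Char) :
    (let k := (ref.takeWhile (fun c => c = '.')).length
     let gap_pos := (List.range' k (ref.length - k)).filter (fun i => ref.getD i ' ' == '.')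
     let base := (s ++ List.replicate ref.length '.').take (ref.length - gap_pos.length)
     gap_pos.foldl (fun acc (p : Nat) => PySem.List.insert acc (p : Int) '.') base)
    = (s.take ((ref.takeWhile (fun c => c = '.')).length)
        ++ List.replicate ((ref.takeWhile (fun c => c = '.')).length - s.length) '.')
      ++ pvFillGaps (ref.drop ((ref.takeWhile (fun c => c = '.')).length))
          (s.drop ((ref.takeWhile (fun c => c = '.')).length)) := by
  set pre := ref.takeWhile (fun c => c = '.') with hpre
  set t := ref.dropWhile (fun c => c = '.') with ht
  have hsplit : pre ++ t = ref := List.takeWhile_append_dropWhile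
  set k := pre.length with hk
  set m := pvM t with hm
  set g := pvGapIdx t with hg
  have hlen : ref.length = k + t.length := by conv_lhs => rw [← hsplit, List.length_append]
  have hdrop : ref.drop k = t := by conv_lhs => rw [← hsplit]; rw [List.drop_left]
  have hmle : m ≤ t.length := List.countP_le_length
  -- the gap positions
  have hgap : (List.range' k (ref.length - k)).filter (fun i => ref.getD i ' ' == '.')
      = g.map (fun q => k + q) := by
    rw [show ref.length - k = t.length by omega]
    conv_lhs => rw [← hsplit]
    exact pv_gap_pos_eq t pre
  have hglen : g.length = t.countP (fun c => c == '.') := pv_length_gapIdx t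
  have hcsplit : t.countP (fun c => c == '.') + m = t.length := pv_countP_split t
  have hncons : ref.length - (g.map (fun q => k + q)).length = k + m := by
    simp [hglen]; omega
  simp only [hgap, hncons]
  set base := (s ++ List.replicate ref.length '.').take (k + m) with hbase
  have hbaselen : base.length = k + m := by
    simp [hbase]; omega
  have hheadlen : (base.take k).length = k := by simp [hbaselen]
  -- fold of shifted inserts
  rw [show (fun acc (p : Nat) => PySem.List.insert acc (p : Int) '.') = pvInsF from rfl]
  conv_lhs => rw [← List.take_append_drop k base]
  rw [pv_foldl_insert_shift g k (base.take k) (base.drop k) hheadlen]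
  have htaillen : (base.drop k).length = m := by simp [hbaselen]
  rw [pv_insertAll_eq_fillGaps t (base.drop k) (by rw [htaillen])]
  -- tail streams agree on the first m characters
  have htail : pvFillGaps t (base.drop k) = pvFillGaps t (s.drop k) := by
    apply pv_fillGaps_congr
    intro i hi
    rw [pv_getD_drop, pv_getD_drop, hbase, pv_getD_take _ _ _ _ (by omega),
        pv_getD_append_replicate_dot]
  -- heads agree
  have hhead : base.take k = s.take k ++ List.replicate (k - s.length) '.' := by
    rw [hbase, List.take_take, min_eq_left (by omega), List.take_append]
    congr 1
    rw [List.take_replicate, min_eq_left (by omega)]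
  rw [htail, hhead, hdrop]

-- ===== VERDICT (by name: the statement is the Claim_ definition above) =====
theorem build_sequence_alignment_spec : Claim_equal_build_sequence_alignment := by
  intro seq v_ref_gapped v_seq_start v_seq_end v_germ_start v_germ_end j_seq_end _
  unfold Spec_build_sequence_alignment build_sequence_alignment build_sequence_alignment_alt
  by_cases hv : v_ref_gapped.toList = []
  · simp [hv]
  · simp only [hv, if_false]
    rw [pvLoopA_false_split, ← pv_main]
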